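-- pv_equiv track=rewrite | github.com/lokashrinav/lc | 1614 Maximum Nesting Depth of the Parentheses/1614maximum-nesting-depth-of-the-parentheses.py | maxDepth
-- ===== SOURCE A (Python) =====
-- def maxDepth(s: str) -> int:
--
--     first = maxNum = 0
--     for elem in s:
--         if elem == "(":
--             first += 1
--         elif elem == ")":
--             first -= 1
--
--         maxNum = max(maxNum, first)
--
--     return maxNum
-- ===== SOURCE B (Python) =====
-- def maxDepth(s: str) -> int:
--     # Right-to-left scan: best is the maximum, clamped at 0, over sums of
--     # deltas of prefixes of the remaining suffix; correct because the max
--     # prefix balance of s satisfies M(c::t) = max(0, delta(c) + M(t)).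
--     best = 0
--     for c in reversed(s):
--         best = max(0, (1 if c == "(" else -1 if c == ")" else 0) + best)
--     return best
-- ===== Notes on version B (the rewrite author's own statement) =====
-- stated objective: alternative
-- what changed: Scans the string right-to-left with a single clamped accumulator best = max(0, delta + best) (a max-clamped suffix sum, Kadane-style), instead of A's left-to-right scan maintaining the current depth plus a separate running maximum.
import Mathlib
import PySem

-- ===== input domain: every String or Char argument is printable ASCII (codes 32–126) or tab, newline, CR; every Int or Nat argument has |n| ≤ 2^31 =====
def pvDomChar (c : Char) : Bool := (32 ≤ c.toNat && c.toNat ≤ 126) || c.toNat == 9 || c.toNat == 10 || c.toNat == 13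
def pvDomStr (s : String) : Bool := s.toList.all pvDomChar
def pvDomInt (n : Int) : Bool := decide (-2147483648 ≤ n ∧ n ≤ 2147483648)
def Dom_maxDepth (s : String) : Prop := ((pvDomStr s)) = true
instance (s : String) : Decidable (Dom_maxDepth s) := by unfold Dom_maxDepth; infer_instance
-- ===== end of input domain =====

-- B scans right-to-left with one clamped accumulator max(0, delta + best) instead of A's
-- left-to-right depth + running-max pair; same O(n) cost, alternative decomposition.

-- ===== PORT A =====
def maxDepth (s : String) : Int :=
  (s.toList.foldl (fun (st : Int × Int) (elem : Char) =>
    let first := if elem = '(' then st.1 + 1 else if elem = ')' then st.1 - 1 else st.1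
    (first, max st.2 first)) (0, 0)).2

-- ===== PORT B =====
def maxDepth_alt (s : String) : Int :=
  -- `for c in reversed(s)` with accumulator best = max(0, delta c + best) is a right fold
  s.toList.foldr (fun (c : Char) (best : Int) =>
    max 0 ((if c = '(' then (1 : Int) else if c = ')' then -1 else 0) + best)) 0

-- ===== PRECONDITION & SPEC =====
def Spec_maxDepth (s : String) (out : Int) : Prop := out = maxDepth_alt s
instance (s : String) (out : Int) : Decidable (Spec_maxDepth s out) := by unfold Spec_maxDepth; infer_instance

-- ===== CLAIM (what is proved, stated in full; the proofs are below) =====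
def Claim_equal_maxDepth : Prop := ∀ (s : String), Dom_maxDepth s → Spec_maxDepth s (maxDepth s)

-- ===== LEMMAS AND PROOFS =====

def pvBrec (cs : List Char) : Int :=
  cs.foldr (fun (c : Char) (best : Int) =>
    max 0 ((if c = '(' then (1 : Int) else if c = ')' then -1 else 0) + best)) 0

theorem pvBrec_nonneg (cs : List Char) : 0 ≤ pvBrec cs := by
  cases cs with
  | nil => simp [pvBrec]
  | cons c cs => simp [pvBrec, List.foldr]

theorem pvA_eq_brec (cs : List Char) : ∀ (f m : Int), f ≤ m →
    (cs.foldl (fun (st : Int × Int) (elem : Char) =>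
      let first := if elem = '(' then st.1 + 1 else if elem = ')' then st.1 - 1 else st.1
      (first, max st.2 first)) (f, m)).2
    = max m (f + pvBrec cs) := by
  induction cs with
  | nil => intro f m hfm; simp [pvBrec]; omega
  | cons c cs ih =>
    intro f m hfm
    have hb := pvBrec_nonneg cs
    have hstep : pvBrec (c :: cs)
        = max 0 ((if c = '(' then (1 : Int) else if c = ')' then -1 else 0) + pvBrec cs) := rfl
    have hfold :
        (List.foldl (fun (st : Int × Int) (elem : Char) =>
          let first := if elem = '(' then st.1 + 1 else if elem = ')' then st.1 - 1 else st.1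
          (first, max st.2 first)) (f, m) (c :: cs)).2
        = (List.foldl (fun (st : Int × Int) (elem : Char) =>
          let first := if elem = '(' then st.1 + 1 else if elem = ')' then st.1 - 1 else st.1
          (first, max st.2 first))
          ((if c = '(' then f + 1 else if c = ')' then f - 1 else f),
           max m (if c = '(' then f + 1 else if c = ')' then f - 1 else f)) cs).2 := rfl
    rw [hfold, ih _ _ (le_max_right _ _), hstep]
    by_cases h1 : c = '(' <;> by_cases h2 : c = ')' <;> simp only [h1, h2, Char.reduceEq, reduceIte] <;> omega

-- ===== VERDICT (by name: the statement is the Claim_ definition above) =====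
theorem maxDepth_spec : Claim_equal_maxDepth := by
  intro s _
  unfold Spec_maxDepth maxDepth maxDepth_alt
  have h := pvA_eq_brec s.toList 0 0 le_rfl
  have hb := pvBrec_nonneg s.toList
  unfold pvBrec at h hb
  omega
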